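-- pv_equiv track=rewrite | github.com/viki-m13/nba2 | src/sniper_model.py | _largest_run
-- ===== SOURCE A (Python) =====
-- def _largest_run(events, is_home):
--     max_run = 0
--     run = 0
--     for e in events:
--         if e['is_home'] == is_home:
--             run += e['pts']
--         else:
--             max_run = max(max_run, run)
--             run = 0
--     return max(max_run, run)
-- ===== SOURCE B (Python) =====
-- def _merge(l, r):
--     # Merge the summaries (closed, pre, suf, all) of two adjacent segments.
--     lc, lp, ls, la = l
--     rc, rp, rs, ra = r
--     c = max(lc, rc)
--     if not la and not ra:
--         c = max(c, ls + rp)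
--     pre = lp + rp if la else lp
--     suf = rs + ls if ra else rs
--     return (c, pre, suf, la and ra)
--
--
-- def _largest_run(events, is_home):
--     # Divide and conquer: summarise each half-open segment [lo, hi) as a
--     # 4-tuple (closed, pre, suf, all) -- the best total over runs closed on
--     # both sides (floored at 0), the totals of the maximal prefix/suffix runs,
--     # and whether every event in the segment matches -- and merge halves.
--     def summary(lo, hi):
--         if hi - lo == 0:
--             return (0, 0, 0, True)
--         if hi - lo == 1:
--             e = events[lo]
--             if e['is_home'] == is_home:
--                 p = e['pts']
--                 return (0, p, p, True)
--             return (0, 0, 0, False)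
--         mid = (lo + hi) // 2
--         return _merge(summary(lo, mid), summary(mid, hi))
--     c, pre, suf, _ = summary(0, len(events))
--     return max(max(c, pre), suf)
-- ===== Notes on version B (the rewrite author's own statement) =====
-- stated objective: alternative
-- what changed: Replaces A's single left-to-right running-max scan by a divide-and-conquer algorithm: each half-open segment is summarised as (best closed-run total floored at 0, prefix-run total, suffix-run total, all-matching flag) and adjacent summaries are merged recursively.
import Mathlib
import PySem

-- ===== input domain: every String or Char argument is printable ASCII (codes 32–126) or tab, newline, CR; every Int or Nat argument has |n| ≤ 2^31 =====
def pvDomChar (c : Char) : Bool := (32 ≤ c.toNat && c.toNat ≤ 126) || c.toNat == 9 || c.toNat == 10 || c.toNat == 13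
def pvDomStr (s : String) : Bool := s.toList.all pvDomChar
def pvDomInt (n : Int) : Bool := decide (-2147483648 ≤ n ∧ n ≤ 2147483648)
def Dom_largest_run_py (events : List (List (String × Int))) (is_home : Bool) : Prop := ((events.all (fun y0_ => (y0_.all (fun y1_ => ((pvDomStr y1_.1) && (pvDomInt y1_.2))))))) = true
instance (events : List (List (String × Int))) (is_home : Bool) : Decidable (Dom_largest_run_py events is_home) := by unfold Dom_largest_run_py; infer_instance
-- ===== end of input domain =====

-- B replaces A's running-maximum scan by a divide-and-conquer algorithm that
-- summarises each half of the event list as (closed, pre, suf, all) and merges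
-- the two summaries; alternative decomposition, not faster.

-- ===== PORT A =====
-- Python `e['is_home'] == is_home` compares an int with a bool: true iff the value is 1 (True) resp. 0 (False).
def pvMatch (e : List (String × Int)) (is_home : Bool) : Bool :=
  (PySem.Dict.ofList e).getD "is_home" 0 == (if is_home then (1 : Int) else 0)

def pvPts (e : List (String × Int)) : Int := (PySem.Dict.ofList e).getD "pts" 0

def pvStepA (is_home : Bool) (st : Int × Int) (e : List (String × Int)) : Int × Int :=
  if pvMatch e is_home then (st.1, st.2 + pvPts e)
  else (max st.1 st.2, 0)

def largest_run_py (events : List (List (String × Int))) (is_home : Bool) : Int :=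
  let s := events.foldl (pvStepA is_home) (0, 0)
  max s.1 s.2

-- ===== PORT B =====
-- _merge: combine the summaries (closed, pre, suf, all) of two adjacent segments
def pvMerge : (Int × Int × Int × Bool) → (Int × Int × Int × Bool) → (Int × Int × Int × Bool)
  | (lc, lp, ls, la), (rc, rp, rs, ra) =>
    let c := max lc rc
    let c := if !la && !ra then max c (ls + rp) else c
    (c, if la then lp + rp else lp, if ra then rs + ls else rs, la && ra)

-- summary(lo, hi); indices are Nats since Python only ever calls it with 0 ≤ lo ≤ hi,
-- so `(lo + hi) // 2` is Nat division and `events[lo]` (ported via `events[lo]?.getD []`,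
-- exact because lo < len(events) whenever that branch runs with hi ≤ len(events)) never raises.
def pvSummary (events : List (List (String × Int))) (is_home : Bool) (lo hi : Nat) :
    Int × Int × Int × Bool :=
  if hi - lo = 0 then (0, 0, 0, true)
  else if hi - lo = 1 then
    let e := events[lo]?.getD []
    if pvMatch e is_home then (0, pvPts e, pvPts e, true) else (0, 0, 0, false)
  else
    let mid := (lo + hi) / 2
    pvMerge (pvSummary events is_home lo mid) (pvSummary events is_home mid hi)
termination_by hi - lo
decreasing_by all_goals omega

def largest_run_py_alt (events : List (List (String × Int))) (is_home : Bool) : Int :=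
  let s := pvSummary events is_home 0 events.length
  max (max s.1 s.2.1) s.2.2.1

-- ===== PRECONDITION & SPEC =====
-- Pre_ excludes exactly the inputs where Python A raises KeyError: an event without the
-- 'is_home' key, or a matching event without the 'pts' key.
def Pre_largest_run_py (events : List (List (String × Int))) (is_home : Bool) : Prop :=
  ∀ e ∈ events, (PySem.Dict.ofList e).contains "is_home" = true ∧
    (pvMatch e is_home = true → (PySem.Dict.ofList e).contains "pts" = true)
instance (events : List (List (String × Int))) (is_home : Bool) : Decidable (Pre_largest_run_py events is_home) := by unfold Pre_largest_run_py; infer_instance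

def pvWitness_largest_run_py : (List (List (String × Int))) × Bool :=
  ([[("is_home", 1), ("pts", 3)], [("is_home", 0), ("pts", 2)], [("is_home", 1), ("pts", 2)]], true)

def Spec_largest_run_py (events : List (List (String × Int))) (is_home : Bool) (out : Int) : Prop := out = largest_run_py_alt events is_home
instance (events : List (List (String × Int))) (is_home : Bool) (out : Int) : Decidable (Spec_largest_run_py events is_home out) := by unfold Spec_largest_run_py; infer_instance

-- ===== CLAIM (what is proved, stated in full; the proofs are below) =====
def Claim_equal_largest_run_py : Prop := ∀ (events : List (List (String × Int))) (is_home : Bool), Dom_largest_run_py events is_home → Pre_largest_run_py events is_home → Spec_largest_run_py events is_home (largest_run_py events is_home)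

-- ===== LEMMAS AND PROOFS =====

-- the summary of a one-event segment
def pvSingle (is_home : Bool) (e : List (String × Int)) : Int × Int × Int × Bool :=
  if pvMatch e is_home then (0, pvPts e, pvPts e, true) else (0, 0, 0, false)

-- left-fold characterisation of the segment summary
def pvQ (is_home : Bool) (L : List (List (String × Int))) : Int × Int × Int × Bool :=
  L.foldl (fun a e => pvMerge a (pvSingle is_home e)) (0, 0, 0, true)

lemma pvMerge_c_nonneg (a b : Int × Int × Int × Bool) (h : 0 ≤ a.1) :
    0 ≤ (pvMerge a b).1 := by
  obtain ⟨lc, lp, ls, la⟩ := a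
  obtain ⟨rc, rp, rs, ra⟩ := b
  simp only [pvMerge]
  split_ifs <;> simp_all [max_def] <;> split_ifs <;> omega

lemma pvMerge_idl (x : Int × Int × Int × Bool) (h : 0 ≤ x.1) :
    pvMerge (0, 0, 0, true) x = x := by
  obtain ⟨xc, xp, xs, xa⟩ := x
  simp only [pvMerge]
  simp_all

lemma pvMerge_id_right (x : Int × Int × Int × Bool) (h : 0 ≤ x.1) :
    pvMerge x (0, 0, 0, true) = x := by
  obtain ⟨xc, xp, xs, xa⟩ := x
  simp only [pvMerge]
  simp_all

lemma pvMerge_assoc (a b c : Int × Int × Int × Bool)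
    (hb : b.2.2.2 = true → b.2.1 = b.2.2.1) :
    pvMerge (pvMerge a b) c = pvMerge a (pvMerge b c) := by
  obtain ⟨ac_, ap, as_, aa⟩ := a
  obtain ⟨bc_, bp, bs, ba⟩ := b
  obtain ⟨cc_, cp, cs, ca⟩ := c
  simp only at hb
  cases aa <;> cases ba <;> cases ca <;>
    simp_all [pvMerge, max_def] <;> split_ifs <;> omega

lemma pvSingle_inv (is_home : Bool) (e : List (String × Int)) :
    (pvSingle is_home e).2.2.2 = true → (pvSingle is_home e).2.1 = (pvSingle is_home e).2.2.1 := by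
  simp only [pvSingle]; split_ifs <;> simp

lemma pvSingle_c (is_home : Bool) (e : List (String × Int)) : (pvSingle is_home e).1 = 0 := by
  simp only [pvSingle]; split_ifs <;> rfl

lemma pvQ_foldl (is_home : Bool) :
    ∀ (L : List (List (String × Int))) (a : Int × Int × Int × Bool), 0 ≤ a.1 →
      L.foldl (fun a e => pvMerge a (pvSingle is_home e)) a = pvMerge a (pvQ is_home L) := by
  intro L
  induction L with
  | nil => intro a ha; simpa [pvQ] using (pvMerge_id_right a ha).symm
  | cons e t ih =>
    intro a ha
    have h1 : 0 ≤ (pvMerge a (pvSingle is_home e)).1 := pvMerge_c_nonneg _ _ ha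
    have h0 : 0 ≤ (pvSingle is_home e).1 := by rw [pvSingle_c]
    calc (e :: t).foldl (fun a e => pvMerge a (pvSingle is_home e)) a
        = t.foldl (fun a e => pvMerge a (pvSingle is_home e)) (pvMerge a (pvSingle is_home e)) := rfl
      _ = pvMerge (pvMerge a (pvSingle is_home e)) (pvQ is_home t) := ih _ h1
      _ = pvMerge a (pvMerge (pvSingle is_home e) (pvQ is_home t)) :=
          pvMerge_assoc _ _ _ (pvSingle_inv is_home e)
      _ = pvMerge a (pvQ is_home (e :: t)) := by
          congr 1
          have : pvQ is_home (e :: t)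
              = t.foldl (fun a e => pvMerge a (pvSingle is_home e)) (pvMerge (0,0,0,true) (pvSingle is_home e)) := rfl
          rw [this, pvMerge_idl _ h0, ih _ h0]

lemma pvQ_c_nonneg (is_home : Bool) (L : List (List (String × Int))) : 0 ≤ (pvQ is_home L).1 := by
  have : ∀ (M : List (List (String × Int))) (a : Int × Int × Int × Bool), 0 ≤ a.1 →
      0 ≤ (M.foldl (fun a e => pvMerge a (pvSingle is_home e)) a).1 := by
    intro M
    induction M with
    | nil => intro a ha; simpa using ha
    | cons e t ih => intro a ha; exact ih _ (pvMerge_c_nonneg _ _ ha)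
  exact this L (0,0,0,true) le_rfl

lemma pvQ_append (is_home : Bool) (L1 L2 : List (List (String × Int))) :
    pvQ is_home (L1 ++ L2) = pvMerge (pvQ is_home L1) (pvQ is_home L2) := by
  have h := pvQ_foldl is_home L2 (pvQ is_home L1) (pvQ_c_nonneg is_home L1)
  simpa [pvQ, List.foldl_append] using h

lemma pvSummary_eq_Q (events : List (List (String × Int))) (is_home : Bool) :
    ∀ (n lo hi : Nat), hi - lo = n → hi ≤ events.length →
      pvSummary events is_home lo hi = pvQ is_home ((events.drop lo).take (hi - lo)) := by
  intro n
  induction n using Nat.strong_induction_on with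
  | _ n ih =>
    intro lo hi hn hlen
    subst hn
    by_cases h0 : hi - lo = 0
    · rw [pvSummary]; simp [h0, pvQ]
    · by_cases h1 : hi - lo = 1
      · have hlo : lo < events.length := by omega
        have hdrop : events.drop lo = events[lo] :: events.drop (lo + 1) :=
          List.drop_eq_getElem_cons hlo
        rw [pvSummary, h1]
        norm_num
        have hseg : (events.drop lo).take 1 = [events[lo]] := by
          rw [hdrop]; rfl
        rw [hseg]
        have hget : events[lo]?.getD [] = events[lo] := by
          simp [List.getElem?_eq_getElem hlo]
        rw [hget]
        have hq : pvQ is_home [events[lo]]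
            = pvMerge (0,0,0,true) (pvSingle is_home events[lo]) := rfl
        rw [hq, pvMerge_idl _ (by rw [pvSingle_c])]
        simp [pvSingle]
      · have h2 : 2 ≤ hi - lo := by omega
        rw [pvSummary]
        simp only [h0, h1, if_false]
        have hmidlt : (lo + hi) / 2 < hi := by omega
        have hmidgt : lo < (lo + hi) / 2 := by omega
        rw [ih ((lo + hi) / 2 - lo) (by omega) lo ((lo + hi) / 2) rfl (le_trans hmidlt.le hlen),
            ih (hi - (lo + hi) / 2) (by omega) ((lo + hi) / 2) hi rfl hlen]
        rw [← pvQ_append]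
        congr 1
        have hsplit : hi - lo = ((lo + hi) / 2 - lo) + (hi - (lo + hi) / 2) := by omega
        rw [hsplit, List.take_add]
        congr 1
        rw [List.drop_drop]
        congr 1
        congr 1
        omega

-- the A-side loop invariant against the segment summary
set_option maxHeartbeats 1000000 in
lemma pvAB (is_home : Bool) :
    ∀ (L : List (List (String × Int))) (m r qc qp qs : Int) (qa : Bool),
      0 ≤ qc →
      (qa = true → m = 0 ∧ qc = 0 ∧ r = qp ∧ r = qs) →
      (qa = false → m = max qc qp ∧ r = qs) →
      (let s := L.foldl (pvStepA is_home) (m, r)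
       let q' := L.foldl (fun a e => pvMerge a (pvSingle is_home e)) (qc, qp, qs, qa)
       max s.1 s.2 = max (max q'.1 q'.2.1) q'.2.2.1) := by
  intro L
  induction L with
  | nil =>
    intro m r qc qp qs qa hc hT hF
    cases qa with
    | true =>
      obtain ⟨h1, h2, h3, h4⟩ := hT rfl
      subst h1 h2 h3
      simp only [List.foldl_nil]
      simp [max_def] at h4 ⊢
      split_ifs <;> omega
    | false =>
      obtain ⟨h1, h2⟩ := hF rfl
      subst h1 h2
      simp
  | cons e t ih =>
    intro m r qc qp qs qa hc hT hF
    simp only [List.foldl_cons]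
    by_cases hm : pvMatch e is_home = true
    · have hA : pvStepA is_home (m, r) e = (m, r + pvPts e) := by simp [pvStepA, hm]
      have hS : pvSingle is_home e = (0, pvPts e, pvPts e, true) := by simp [pvSingle, hm]
      rw [hA, hS]
      cases qa with
      | true =>
        obtain ⟨h1, h2, h3, h4⟩ := hT rfl
        have hq' : pvMerge (qc, qp, qs, true) (0, pvPts e, pvPts e, true)
            = (max qc 0, qp + pvPts e, pvPts e + qs, true) := by simp [pvMerge]
        rw [hq']
        refine ih _ _ _ _ _ _ (by omega) (fun _ => ⟨h1, by omega, by omega, by omega⟩)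
          (by simp)
      | false =>
        obtain ⟨h1, h2⟩ := hF rfl
        have hq' : pvMerge (qc, qp, qs, false) (0, pvPts e, pvPts e, true)
            = (max qc 0, qp, pvPts e + qs, false) := by simp [pvMerge]
        rw [hq']
        refine ih _ _ _ _ _ _ (by omega) (by simp)
          (fun _ => ⟨?_, by omega⟩)
        rw [h1]
        have : max qc 0 = qc := by omega
        rw [this]
    · have hm' : pvMatch e is_home = false := by simpa using hm
      have hA : pvStepA is_home (m, r) e = (max m r, 0) := by simp [pvStepA, hm']
      have hS : pvSingle is_home e = (0, 0, 0, false) := by simp [pvSingle, hm']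
      rw [hA, hS]
      cases qa with
      | true =>
        obtain ⟨h1, h2, h3, h4⟩ := hT rfl
        have hq' : pvMerge (qc, qp, qs, true) (0, 0, 0, false)
            = (max qc 0, qp + 0, 0, false) := by simp [pvMerge]
        rw [hq']
        refine ih _ _ _ _ _ _ (by omega) (by simp) (fun _ => ⟨?_, rfl⟩)
        simp only [max_def]
        split_ifs <;> omega
      | false =>
        obtain ⟨h1, h2⟩ := hF rfl
        have hq' : pvMerge (qc, qp, qs, false) (0, 0, 0, false)
            = (max (max qc 0) (qs + 0), qp, 0, false) := by simp [pvMerge]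
        rw [hq']
        refine ih _ _ _ _ _ _ (by positivity) (by simp) (fun _ => ⟨?_, rfl⟩)
        simp only [h1, h2, max_def]
        split_ifs <;> omega

-- ===== VERDICT (by name: the statement is the Claim_ definition above) =====
theorem largest_run_py_spec : Claim_equal_largest_run_py := by
  intro events is_home _ _
  have hsum := pvSummary_eq_Q events is_home (events.length - 0) 0 events.length rfl le_rfl
  have hseg : (events.drop 0).take (events.length - 0) = events := by simp
  rw [hseg] at hsum
  have hinv := pvAB is_home events 0 0 0 0 0 true le_rfl
    (fun _ => ⟨rfl, rfl, rfl, rfl⟩) (by simp)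
  simp only at hinv
  show largest_run_py events is_home = largest_run_py_alt events is_home
  rw [largest_run_py, largest_run_py_alt, hsum]
  exact hinv
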